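-- pv_equiv track=rewrite | github.com/welnecker/PERSONAGENS2025 | characters/laura/service.py | _compact_user_evidence
-- ===== SOURCE A (Python) =====
-- from typing import List, Dict, Tuple
--
-- def _compact_user_evidence(docs: List[Dict], max_chars: int = 320) -> str:
--     snippets: List[str] = []
--     for d in reversed(docs):
--         u = (d.get("mensagem_usuario") or "").strip()
--         if u:
--             u = " ".join(u.split())
--             snippets.append(u)
--         if len(snippets) >= 4:
--             break
--     s = " | ".join(reversed(snippets))[:max_chars]
--     return s
-- ===== SOURCE B (Python) =====
-- from typing import List, Dict
--
-- def _compact_user_evidence(docs: List[Dict], max_chars: int = 320) -> str: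
--     # One forward pass collecting every non-empty normalized message,
--     # then keep the last four by slicing; no reversed() and no break.
--     all_snippets: List[str] = []
--     for d in docs:
--         u = (d.get("mensagem_usuario") or "").strip()
--         if u:
--             all_snippets.append(" ".join(u.split()))
--     return " | ".join(all_snippets[-4:])[:max_chars]
-- ===== Notes on version B (the rewrite author's own statement) =====
-- stated objective: simpler
-- what changed: B replaces A's reverse-iterate/collect-up-to-4/break/re-reverse logic with a single forward pass that collects all normalized messages and then takes the last four with a [-4:] slice, keeping chronological order automatically.
import Mathlib
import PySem

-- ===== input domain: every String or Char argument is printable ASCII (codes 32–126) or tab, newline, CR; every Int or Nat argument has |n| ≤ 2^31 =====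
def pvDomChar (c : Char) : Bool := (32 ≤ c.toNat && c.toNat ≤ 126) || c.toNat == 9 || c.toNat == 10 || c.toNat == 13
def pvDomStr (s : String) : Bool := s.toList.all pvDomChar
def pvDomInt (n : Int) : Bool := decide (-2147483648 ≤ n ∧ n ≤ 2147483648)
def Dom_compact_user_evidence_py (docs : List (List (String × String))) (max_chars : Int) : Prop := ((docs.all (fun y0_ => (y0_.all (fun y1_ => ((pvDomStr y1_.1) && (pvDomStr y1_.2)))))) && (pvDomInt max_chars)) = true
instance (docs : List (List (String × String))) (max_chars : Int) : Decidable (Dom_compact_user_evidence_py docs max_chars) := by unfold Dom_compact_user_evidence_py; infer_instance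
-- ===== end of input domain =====

-- B replaces A's reverse-iterate/collect-up-to-4/break/re-reverse logic with one forward
-- pass over docs plus a [-4:] slice; objective: simpler.

-- ===== PORT A =====
-- the loop 'for d in reversed(docs): … if len(snippets) >= 4: break' with its early break
-- (d.get("mensagem_usuario") or "") : a missing key or an empty-string value both give "",
-- so it is ported as .getD "".
def pvLoopA : List (List (String × String)) → List String → List String
  | [], snippets => snippets
  | d :: rest, snippets =>
    let u := PySem.Str.strip (((PySem.Dict.mk d).get? "mensagem_usuario").getD "")
    let snippets' := if u ≠ "" then snippets ++ [PySem.Str.join " " (PySem.Str.split₀ u)] else snippets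
    if snippets'.length ≥ 4 then snippets' else pvLoopA rest snippets'

def compact_user_evidence_py (docs : List (List (String × String))) (max_chars : Int) : String :=
  let snippets := pvLoopA docs.reverse []
  PySem.Str.slice (PySem.Str.join " | " snippets.reverse) none (some max_chars)

-- ===== PORT B =====
def compact_user_evidence_py_alt (docs : List (List (String × String))) (max_chars : Int) : String :=
  let all_snippets := docs.foldl (fun acc d =>
    let u := PySem.Str.strip (((PySem.Dict.mk d).get? "mensagem_usuario").getD "")
    if u ≠ "" then acc ++ [PySem.Str.join " " (PySem.Str.split₀ u)] else acc) []
  PySem.Str.slice (PySem.Str.join " | " (PySem.List.slice all_snippets (some (-4)) none)) none (some max_chars)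

-- ===== PRECONDITION & SPEC =====
def Spec_compact_user_evidence_py (docs : List (List (String × String))) (max_chars : Int) (out : String) : Prop := out = compact_user_evidence_py_alt docs max_chars
instance (docs : List (List (String × String))) (max_chars : Int) (out : String) : Decidable (Spec_compact_user_evidence_py docs max_chars out) := by unfold Spec_compact_user_evidence_py; infer_instance

-- ===== CLAIM (what is proved, stated in full; the proofs are below) =====
def Claim_equal_compact_user_evidence_py : Prop := ∀ (docs : List (List (String × String))) (max_chars : Int), Dom_compact_user_evidence_py docs max_chars → Spec_compact_user_evidence_py docs max_chars (compact_user_evidence_py docs max_chars)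

-- ===== LEMMAS AND PROOFS =====

-- the normalized message a doc contributes (none = skipped)
def pvF (d : List (String × String)) : Option String :=
  let u := PySem.Str.strip (((PySem.Dict.mk d).get? "mensagem_usuario").getD "")
  if u ≠ "" then some (PySem.Str.join " " (PySem.Str.split₀ u)) else none

theorem pvF_pos (d : List (String × String))
    (hu : PySem.Str.strip (((PySem.Dict.mk d).get? "mensagem_usuario").getD "") ≠ "") :
    pvF d = some (PySem.Str.join " " (PySem.Str.split₀ (PySem.Str.strip (((PySem.Dict.mk d).get? "mensagem_usuario").getD "")))) := by
  simp only [pvF]; rw [if_pos hu]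

theorem pvF_neg (d : List (String × String))
    (hu : ¬ PySem.Str.strip (((PySem.Dict.mk d).get? "mensagem_usuario").getD "") ≠ "") :
    pvF d = none := by
  simp only [pvF]; rw [if_neg hu]

theorem pvLoopA_eq (l : List (List (String × String))) (sn : List String)
    (h : sn.length < 4) : pvLoopA l sn = (sn ++ l.filterMap pvF).take 4 := by
  induction l generalizing sn with
  | nil =>
    simp [pvLoopA, List.take_of_length_le (Nat.le_of_lt h)]
  | cons d rest ih =>
    rw [List.filterMap_cons]
    simp only [pvLoopA]
    set u := PySem.Str.strip (((PySem.Dict.mk d).get? "mensagem_usuario").getD "") with hu_def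
    by_cases hu : u ≠ ""
    · rw [pvF_pos d hu, if_pos hu]
      by_cases hlen : (sn ++ [PySem.Str.join " " (PySem.Str.split₀ u)]).length ≥ 4
      · rw [if_pos hlen]
        have h4 : (sn ++ [PySem.Str.join " " (PySem.Str.split₀ u)]).length = 4 := by
          simp at hlen ⊢; omega
        rw [show sn ++ PySem.Str.join " " (PySem.Str.split₀ u) :: List.filterMap pvF rest
              = (sn ++ [PySem.Str.join " " (PySem.Str.split₀ u)]) ++ List.filterMap pvF rest by simp,
           ← h4, List.take_left]
      · rw [if_neg hlen, ih _ (by simp at hlen ⊢; omega)]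
        rw [hu_def]; simp
    · rw [pvF_neg d hu, if_neg hu, if_neg (by omega), ih _ h]

theorem pvFoldB_eq (l : List (List (String × String))) (acc : List String) :
    l.foldl (fun acc d =>
      let u := PySem.Str.strip (((PySem.Dict.mk d).get? "mensagem_usuario").getD "")
      if u ≠ "" then acc ++ [PySem.Str.join " " (PySem.Str.split₀ u)] else acc) acc
    = acc ++ l.filterMap pvF := by
  induction l generalizing acc with
  | nil => simp
  | cons d rest ih =>
    rw [List.foldl_cons, ih, List.filterMap_cons]
    simp only []
    set u := PySem.Str.strip (((PySem.Dict.mk d).get? "mensagem_usuario").getD "") with hu_def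
    by_cases hu : u ≠ ""
    · rw [pvF_pos d hu, if_pos hu]
      simp only [List.append_assoc, List.singleton_append]
      rw [hu_def]
    · rw [pvF_neg d hu, if_neg hu]

-- ===== VERDICT (by name: the statement is the Claim_ definition above) =====
theorem compact_user_evidence_py_spec : Claim_equal_compact_user_evidence_py := by
  intro docs max_chars _
  unfold Spec_compact_user_evidence_py compact_user_evidence_py compact_user_evidence_py_alt
  rw [pvLoopA_eq _ _ (by simp), pvFoldB_eq]
  simp only [List.nil_append, List.filterMap_reverse]
  rw [PySem.List.slice_some_none, PySem.List.clampIdx_neg_ofNat _ 4 (by omega),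
    List.take_reverse, List.reverse_reverse]
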